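-- pv_equiv track=rewrite | github.com/Pperei1/Modified-Sankoff | tree.py | updateSequence
-- ===== SOURCE A (Python) =====
-- index = ['A','C','G','U','-']
--
-- validPair = [[0,3],[3,0],[1,2],[2,1],[2,3],[3,2]]
--
-- def modifyString(s,pos,newChar):
-- 	st = list(s)
-- 	st[pos] = newChar
-- 	return "".join(st)
--
-- def findComplement(consensus,i):
-- 	count = 1
-- 	pos = i
-- 	while(count != 0):
-- 		pos = pos+1
-- 		if(consensus[pos] == '('):
-- 			count  = count + 1
-- 		elif(consensus[pos] == ')'):
-- 			count = count - 1
-- 	return pos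
--
-- def isValidPair(sequence,i,j):
-- 	valid = False
-- 	for k in range(0,len(validPair)):
-- 		if((sequence[i] == index[validPair[k][0]]) & (sequence[j] == index[validPair[k][1]])):
-- 			valid = True
-- 	return valid
--
-- def findBestPair(mi,mj):
-- 	score = float("inf")
-- 	best = 0
-- 	for i in range(0,len(validPair)):
-- 		b = mi[validPair[i][0]]+mj[validPair[i][1]]
-- 		if(b < score):
-- 			best = i
-- 			score = b
-- 	return best
--
-- def updateSequence(consensus,m,sequence):
-- 	for i in range(0,len(consensus)):
-- 		if(consensus[i] == '('):
-- 			j = findComplement(consensus,i)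
-- 			if(isValidPair(sequence,i,j)):
-- 				best = 0
-- 			else:
-- 				best = findBestPair(m[i],m[j])
-- 				sequence = modifyString(sequence,i,index[validPair[best][0]])
-- 				sequence = modifyString(sequence,j,index[validPair[best][1]])
-- 	return sequence
-- ===== SOURCE B (Python) =====
-- index = ['A','C','G','U','-']
--
-- validPair = [[0,3],[3,0],[1,2],[2,1],[2,3],[3,2]]
--
-- validSet = {('A','U'),('U','A'),('C','G'),('G','C'),('G','U'),('U','G')}
--
-- def updateSequence(consensus, m, sequence):
--     # one stack pass pairs every '(' with its matching ')'
--     stack = []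
--     match = {}
--     for k, c in enumerate(consensus):
--         if c == '(':
--             stack.append(k)
--         elif c == ')':
--             if stack:
--                 match[stack.pop()] = k
--     seq = list(sequence)
--     for i in sorted(match):
--         j = match[i]
--         if (seq[i], seq[j]) not in validSet:
--             mi, mj = m[i], m[j]
--             best = min(range(6), key=lambda t: mi[validPair[t][0]] + mj[validPair[t][1]])
--             seq[i] = index[validPair[best][0]]
--             seq[j] = index[validPair[best][1]]
--     return "".join(seq)
-- ===== Notes on version B (the rewrite author's own statement) =====
-- stated objective: alternative
-- what changed: A rescans the consensus from each '(' to find its matching ')' (findComplement) and rebuilds the whole string on every edit; B pairs all parentheses in one stack pass over the consensus, then edits the sequence as a mutable char list and joins once.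
-- outside the precondition, e.g. on updateSequence('()', [], 'AU'): A returns 'AU', B returns 'AU'
import Mathlib
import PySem

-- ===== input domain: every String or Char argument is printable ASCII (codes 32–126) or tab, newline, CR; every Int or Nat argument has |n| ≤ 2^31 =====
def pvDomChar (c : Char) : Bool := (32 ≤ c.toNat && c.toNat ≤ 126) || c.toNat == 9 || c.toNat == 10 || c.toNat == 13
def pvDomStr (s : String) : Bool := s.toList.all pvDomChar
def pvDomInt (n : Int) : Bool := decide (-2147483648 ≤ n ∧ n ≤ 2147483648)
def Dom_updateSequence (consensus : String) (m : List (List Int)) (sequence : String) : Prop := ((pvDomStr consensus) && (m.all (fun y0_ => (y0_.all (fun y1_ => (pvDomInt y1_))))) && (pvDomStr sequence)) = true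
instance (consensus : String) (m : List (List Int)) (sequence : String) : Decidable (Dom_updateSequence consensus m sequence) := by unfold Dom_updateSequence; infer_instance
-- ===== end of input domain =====

-- B replaces A's per-'(' rescans (findComplement) by ONE stack pass pairing all
-- parentheses, then edits the sequence as a char list and joins once (objective:
-- alternative algorithm). Neither version mutates its arguments.

-- shared balance-counter primitives (used by port A's scan and by Pre_'s closed-form
-- matched-parenthesis condition; they are not part of either port)
def cadd (count : Int) (c : Char) : Int :=
  if c = '(' then count + 1 else if c = ')' then count - 1 else count

def runc (count : Int) (l : List Char) : Int := l.foldl cadd count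

/-- the characters at positions i+1 … q of cs (the span findComplement consumes) -/
def seg (cs : List Char) (i q : Nat) : List Char := (cs.drop (i + 1)).take (q - i)

/-- q is the position where a scan started at '(' position i first sees the counter hit 0:
    the matching ')' of i. -/
abbrev FH (cs : List Char) (i q : Nat) : Prop :=
  i < q ∧ q < cs.length ∧ runc 1 (seg cs i q) = 0 ∧
    ∀ r ∈ List.range q, i < r → runc 1 (seg cs i r) ≠ 0

-- ===== PORT A =====
def pyIndex : List Char := ['A', 'C', 'G', 'U', '-']

def pyValidPair : List (Nat × Nat) := [(0,3), (3,0), (1,2), (2,1), (2,3), (3,2)]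

-- while count != 0: pos += 1; read consensus[pos]  (none = IndexError at pos = len)
def fcAux (cs : List Char) (pos : Nat) (count : Int) : Option Nat :=
  if count = 0 then some pos
  else if h : pos + 1 < cs.length then fcAux cs (pos + 1) (cadd count cs[pos + 1])
  else none
termination_by cs.length - pos
decreasing_by omega

def findComplementA (cs : List Char) (i : Nat) : Option Nat := fcAux cs i 1

-- reads sequence[i], sequence[j] (none = IndexError), then the flag loop over validPair
def isValidPairA (s : List Char) (i j : Nat) : Option Bool :=
  if i < s.length ∧ j < s.length then
    some (pyValidPair.foldl (fun valid p =>
      if s.getD i ' ' = pyIndex.getD p.1 ' ' ∧ s.getD j ' ' = pyIndex.getD p.2 ' '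
      then true else valid) false)
  else none

def ltInf (b : Int) (score : Option Int) : Bool :=
  match score with
  | none => true          -- float("inf"): everything is below it
  | some s => b < s

-- the loop reads mi[0],mi[1],mi[2],mi[3] and mj[0..3] across its six iterations, so it
-- raises IndexError exactly when a row is shorter than 4 (the guard below)
def findBestPairA (mi mj : List Int) : Option Nat :=
  if 4 ≤ mi.length ∧ 4 ≤ mj.length then
    some (((List.range 6).foldl (fun (st : Option Int × Nat) k =>
      let p := pyValidPair.getD k (0, 0)
      let b := mi.getD p.1 0 + mj.getD p.2 0
      if ltInf b st.1 then (some b, k) else st) (none, 0)).2)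
  else none

-- st = list(s); st[pos] = c; "".join(st)   (none = IndexError)
def modifyStringA (s : String) (pos : Nat) (c : Char) : Option String :=
  if pos < s.toList.length then some (String.ofList (s.toList.set pos c)) else none

def updateSequence (consensus : String) (m : List (List Int)) (sequence : String) : String :=
  (((List.range consensus.toList.length).foldl (fun (acc : Option String) i =>
    match acc with
    | none => none
    | some s =>
      if consensus.toList.getD i ' ' = '(' then
        match findComplementA consensus.toList i with
        | none => none
        | some j =>
          match isValidPairA s.toList i j with
          | none => none
          | some true => some s          -- best = 0, sequence unchanged
          | some false =>
            match m[i]?, m[j]? with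
            | some mi, some mj =>
              (match findBestPairA mi mj with
               | none => none
               | some best =>
                 let p := pyValidPair.getD best (0, 0)
                 match modifyStringA s i (pyIndex.getD p.1 ' ') with
                 | none => none
                 | some s1 => modifyStringA s1 j (pyIndex.getD p.2 ' '))
            | _, _ => none
      else some s) (some sequence))).getD ""

-- ===== PORT B =====
def vSet : List (Char × Char) := [('A','U'), ('U','A'), ('C','G'), ('G','C'), ('G','U'), ('U','G')]

-- one step of the stack pass, on (stack, match) with the enumerated (position, char)
def p1step (st : List Nat × List (Nat × Nat)) (kc : Nat × Char) : List Nat × List (Nat × Nat) :=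
  if kc.2 = '(' then (kc.1 :: st.1, st.2)
  else if kc.2 = ')' then
    match st.1 with
    | [] => st
    | i :: rest => (rest, st.2 ++ [(i, kc.1)])   -- match[stack.pop()] = k (key i is fresh)
  else st

-- for k, c in enumerate(consensus): …
def phase1 (cs : List Char) : List Nat × List (Nat × Nat) :=
  (List.range cs.length).foldl (fun s k => p1step s (k, cs.getD k ' ')) ([], [])

-- min(range(6), key = λt. mi[validPair[t][0]] + mj[validPair[t][1]])
def argmin6 (f : Nat → Int) : Nat :=
  (((List.range 6).drop 1).foldl (fun (p : Nat × Int) k =>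
    if f k < p.2 then (k, f k) else p) (0, f 0)).1

def bstep (m : List (List Int)) (mt : List (Nat × Nat)) (seq : List Char) (i : Nat) : List Char :=
  let j := (mt.lookup i).getD 0
  if vSet.contains (seq.getD i ' ', seq.getD j ' ') then seq
  else
    let mi := m.getD i []
    let mj := m.getD j []
    let best := argmin6 (fun t =>
      let q := pyValidPair.getD t (0, 0)
      mi.getD q.1 0 + mj.getD q.2 0)
    let q := pyValidPair.getD best (0, 0)
    (seq.set i (pyIndex.getD q.1 ' ')).set j (pyIndex.getD q.2 ' ')

def updateSequence_alt (consensus : String) (m : List (List Int)) (sequence : String) : String :=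
  let mt := (phase1 consensus.toList).2
  let keys := PySem.List.sorted (mt.map Prod.fst) (fun x => x) false   -- sorted(match)
  String.ofList (keys.foldl (bstep m mt) sequence.toList)

-- ===== PRECONDITION & SPEC =====
-- Pre_ admits the inputs on which A returns: every '(' must have a matching ')' (else
-- findComplement raises IndexError) and both pair positions must index into sequence
-- (else isValidPair raises). It is slightly NARROWER than A's domain in one respect:
-- it always demands the score rows m[i], m[j] (present, length ≥ 4), although A only
-- reads them when the existing base pair is invalid — see the cite in claim.json.
def Pre_updateSequence (consensus : String) (m : List (List Int)) (sequence : String) : Prop :=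
  ∀ i ∈ List.range consensus.toList.length, consensus.toList.getD i ' ' = '(' →
    i < sequence.toList.length ∧ i < m.length ∧ 4 ≤ (m.getD i []).length ∧
    ∃ j ∈ List.range consensus.toList.length, FH consensus.toList i j ∧
      j < sequence.toList.length ∧ j < m.length ∧ 4 ≤ (m.getD j []).length

instance (consensus : String) (m : List (List Int)) (sequence : String) : Decidable (Pre_updateSequence consensus m sequence) := by
  unfold Pre_updateSequence; infer_instance

def pvWitness_updateSequence : String × List (List Int) × String :=
  ("()", [[0,0,0,0],[0,0,0,0]], "AU")

def Spec_updateSequence (consensus : String) (m : List (List Int)) (sequence : String) (out : String) : Prop := out = updateSequence_alt consensus m sequence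
instance (consensus : String) (m : List (List Int)) (sequence : String) (out : String) : Decidable (Spec_updateSequence consensus m sequence out) := by unfold Spec_updateSequence; infer_instance

-- ===== CLAIM (what is proved, stated in full; the proofs are below) =====
def Claim_equal_updateSequence : Prop := ∀ (consensus : String) (m : List (List Int)) (sequence : String), Dom_updateSequence consensus m sequence → Pre_updateSequence consensus m sequence → Spec_updateSequence consensus m sequence (updateSequence consensus m sequence)

-- ===== LEMMAS AND PROOFS =====

lemma seg_self (cs : List Char) (i : Nat) : seg cs i i = [] := by simp [seg]

lemma seg_succ (cs : List Char) (i p : Nat) (h1 : i ≤ p) (h2 : p + 1 < cs.length) :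
    seg cs i (p + 1) = seg cs i p ++ [cs.getD (p + 1) ' '] := by
  unfold seg
  have hpi : p + 1 - i = (p - i) + 1 := by omega
  rw [hpi, List.take_add_one]
  congr 1
  have hd : (cs.drop (i + 1))[p - i]? = cs[i + 1 + (p - i)]? := List.getElem?_drop ..
  have he : i + 1 + (p - i) = p + 1 := by omega
  rw [he] at hd
  rw [hd, List.getElem?_eq_getElem h2, List.getD_eq_getElem _ _ h2]
  rfl

lemma runc_append (c : Int) (l : List Char) (x : Char) :
    runc c (l ++ [x]) = cadd (runc c l) x := by
  simp [runc, List.foldl_append]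

lemma seg_to_succ (cs : List Char) (e k : Nat) (he : e < k) (hk : k < cs.length) :
    seg cs e k = seg cs e (k - 1) ++ [cs.getD k ' '] := by
  have hk1 : k - 1 + 1 = k := by omega
  have h := seg_succ cs e (k - 1) (by omega) (by omega)
  rw [hk1] at h
  exact h

def stInv (cs : List Char) (k : Nat) (st : List Nat) (mt : List (Nat × Nat)) : Prop :=
  st.Nodup ∧
  (∀ e ∈ st, e < k ∧ e < cs.length ∧ cs.getD e ' ' = '(') ∧
  (∀ r (h : r < st.length), runc 1 (seg cs st[r] (k - 1)) = r + 1) ∧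
  (∀ e ∈ st, ∀ r, e < r → r < k → runc 1 (seg cs e r) ≠ 0) ∧
  (∀ p ∈ mt, p.1 < cs.length ∧ cs.getD p.1 ' ' = '(' ∧ p.2 < k ∧ FH cs p.1 p.2) ∧
  (mt.map Prod.fst).Nodup ∧
  (∀ p ∈ mt, p.1 ∉ st) ∧
  (∀ i, i < k → i < cs.length → cs.getD i ' ' = '(' → i ∈ st ∨ ∃ j, (i, j) ∈ mt)

lemma stInv_zero (cs : List Char) : stInv cs 0 [] [] := by
  refine ⟨List.nodup_nil, ?_, ?_, ?_, ?_, ?_, ?_, ?_⟩ <;> simp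

lemma stInv_step (cs : List Char) (k : Nat) (st : List Nat) (mt : List (Nat × Nat))
    (hk : k < cs.length) (h : stInv cs k st mt) :
    stInv cs (k + 1) (p1step (st, mt) (k, cs.getD k ' ')).1 (p1step (st, mt) (k, cs.getD k ' ')).2 := by
  obtain ⟨hnd, hbnd, hbal, hnm, hmt, hknd, hdisj, hcomp⟩ := h
  have hsucc : k + 1 - 1 = k := by omega
  by_cases hc1 : cs.getD k ' ' = '('
  · -- push
    have hstep : p1step (st, mt) (k, cs.getD k ' ') = (k :: st, mt) := by
      simp only [p1step, hc1, reduceIte]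
    rw [hstep]
    refine ⟨?_, ?_, ?_, ?_, ?_, hknd, ?_, ?_⟩
    · exact List.nodup_cons.mpr ⟨fun hmem => absurd (hbnd k hmem).1 (lt_irrefl k), hnd⟩
    · intro e he
      rcases List.mem_cons.mp he with heq | he
      · subst heq; exact ⟨Nat.lt_succ_self _, hk, hc1⟩
      · exact ⟨by have := (hbnd e he).1; omega, (hbnd e he).2.1, (hbnd e he).2.2⟩
    · intro r hr
      rw [hsucc]
      cases r with
      | zero => simp [seg_self, runc]
      | succ r =>
        have hr' : r < st.length := by simpa using hr
        have hek : st[r] < k := (hbnd _ (List.getElem_mem hr')).1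
        have hg : (k :: st)[r + 1] = st[r] := by simp
        rw [hg, seg_to_succ cs st[r] k hek hk, runc_append, hbal r hr', hc1]
        simp [cadd]
    · intro e he r her hrk
      rcases List.mem_cons.mp he with heq | he
      · omega
      · by_cases hr : r < k
        · exact hnm e he r her hr
        · have hreq : r = k := by omega
          rw [hreq]
          obtain ⟨ri, hri, hrieq⟩ := List.getElem_of_mem he
          rw [seg_to_succ cs e k (hbnd e he).1 hk, runc_append, ← hrieq, hbal ri hri, hc1]
          simp [cadd]
          omega
    · exact fun p hp => ⟨(hmt p hp).1, (hmt p hp).2.1, by have := (hmt p hp).2.2.1; omega, (hmt p hp).2.2.2⟩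
    · intro p hp
      have h2 := (hmt p hp).2.2.2.1
      have h3 := (hmt p hp).2.2.1
      simp only [List.mem_cons, not_or]
      exact ⟨by omega, hdisj p hp⟩
    · intro i hik hic hio
      by_cases hi : i < k
      · rcases hcomp i hi hic hio with hin | hex
        · exact Or.inl (List.mem_cons_of_mem _ hin)
        · exact Or.inr hex
      · have : i = k := by omega
        subst this
        exact Or.inl (List.mem_cons_self ..)
  · by_cases hc2 : cs.getD k ' ' = ')'
    · match st, hnd, hbnd, hbal, hnm, hdisj, hcomp with
      | [], _, _, _, _, _, hcomp =>
        have hstep : p1step (([] : List Nat), mt) (k, cs.getD k ' ') = ([], mt) := by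
          simp only [p1step, hc2, Char.reduceEq, reduceIte]
        rw [hstep]
        refine ⟨List.nodup_nil, by simp, by simp [hsucc], by simp, ?_, hknd, by simp, ?_⟩
        · exact fun p hp => ⟨(hmt p hp).1, (hmt p hp).2.1, by have := (hmt p hp).2.2.1; omega, (hmt p hp).2.2.2⟩
        · intro i hik hic hio
          have hi : i < k := by
            rcases Nat.lt_succ_iff_lt_or_eq.mp hik with h | h
            · exact h
            · subst h; rw [hio] at hc1; exact absurd rfl hc1
          exact hcomp i hi hic hio
      | a :: rest, hnd, hbnd, hbal, hnm, hdisj, hcomp =>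
        have hstep : p1step ((a :: rest), mt) (k, cs.getD k ' ') = (rest, mt ++ [(a, k)]) := by
          simp only [p1step, hc2, Char.reduceEq, reduceIte]
        rw [hstep]
        have hak : a < k := (hbnd a (List.mem_cons_self ..)).1
        have hcadd : ∀ x : Int, cadd x (cs.getD k ' ') = x - 1 := by
          intro x; rw [hc2]; simp [cadd]
        have haFH : FH cs a k := by
          refine ⟨hak, hk, ?_, ?_⟩
          · have h0 : runc 1 (seg cs a (k - 1)) = 1 := by
              have := hbal 0 (by simp)
              simpa using this
            rw [seg_to_succ cs a k hak hk, runc_append, h0, hcadd]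
            ring
          · intro r hr har
            exact hnm a (List.mem_cons_self ..) r har (List.mem_range.mp hr)
        refine ⟨hnd.of_cons, ?_, ?_, ?_, ?_, ?_, ?_, ?_⟩
        · intro e he
          have := hbnd e (List.mem_cons_of_mem _ he)
          exact ⟨by omega, this.2.1, this.2.2⟩
        · intro r hr
          rw [hsucc]
          have hr' : r + 1 < (a :: rest).length := by simpa using Nat.succ_lt_succ hr
          have hek : rest[r] < k := (hbnd rest[r] (List.mem_cons_of_mem _ (List.getElem_mem hr))).1
          have hb := hbal (r + 1) hr'
          have hg : (a :: rest)[r + 1] = rest[r] := by simp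
          rw [hg] at hb
          rw [seg_to_succ cs rest[r] k hek hk, runc_append, hb, hcadd]
          push_cast; ring
        · intro e he r her hrk
          by_cases hr : r < k
          · exact hnm e (List.mem_cons_of_mem _ he) r her hr
          · have hreq : r = k := by omega
            rw [hreq]
            obtain ⟨ri, hri, hrieq⟩ := List.getElem_of_mem he
            have hek : e < k := (hbnd e (List.mem_cons_of_mem _ he)).1
            have hr' : ri + 1 < (a :: rest).length := by simpa using Nat.succ_lt_succ hri
            have hb := hbal (ri + 1) hr'
            have hg : (a :: rest)[ri + 1] = rest[ri] := by simp
            rw [hg, hrieq] at hb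
            rw [seg_to_succ cs e k hek hk, runc_append, hb, hcadd]
            intro hcon
            omega
        · intro p hp
          rcases List.mem_append.mp hp with hp | hp
          · exact ⟨(hmt p hp).1, (hmt p hp).2.1, by have := (hmt p hp).2.2.1; omega, (hmt p hp).2.2.2⟩
          · have : p = (a, k) := by simpa using hp
            subst this
            exact ⟨(hbnd a (List.mem_cons_self ..)).2.1, (hbnd a (List.mem_cons_self ..)).2.2, by omega, haFH⟩
        · rw [List.map_append]
          refine List.Nodup.append hknd (by simp) ?_
          intro x hx hx'
          have : x = a := by simpa using hx'
          subst this
          obtain ⟨p, hp, hpeq⟩ := List.mem_map.mp hx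
          exact hdisj p hp (hpeq ▸ List.mem_cons_self ..)
        · intro p hp
          rcases List.mem_append.mp hp with hp | hp
          · intro hmem
            exact hdisj p hp (List.mem_cons_of_mem _ hmem)
          · have : p = (a, k) := by simpa using hp
            subst this
            exact (List.nodup_cons.mp hnd).1
        · intro i hik hic hio
          by_cases hi : i < k
          · rcases hcomp i hi hic hio with hin | ⟨j, hj⟩
            · rcases List.mem_cons.mp hin with rfl | hin
              · exact Or.inr ⟨k, List.mem_append.mpr (Or.inr (by simp))⟩
              · exact Or.inl hin
            · exact Or.inr ⟨j, List.mem_append.mpr (Or.inl hj)⟩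
          · have : i = k := by omega
            subst this
            rw [hio] at hc1
            exact absurd rfl hc1
    · -- other char: state unchanged
      have hstep : p1step (st, mt) (k, cs.getD k ' ') = (st, mt) := by
        simp only [p1step, if_neg hc1, if_neg hc2]
      rw [hstep]
      have hcadd : ∀ x : Int, cadd x (cs.getD k ' ') = x := by
        intro x; unfold cadd; rw [if_neg hc1, if_neg hc2]
      refine ⟨hnd, ?_, ?_, ?_, ?_, hknd, hdisj, ?_⟩
      · exact fun e he => ⟨by have := (hbnd e he).1; omega, (hbnd e he).2.1, (hbnd e he).2.2⟩
      · intro r hr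
        rw [hsucc]
        have hek : st[r] < k := (hbnd _ (List.getElem_mem hr)).1
        rw [seg_to_succ cs st[r] k hek hk, runc_append, hbal r hr, hcadd]
      · intro e he r her hrk
        by_cases hr : r < k
        · exact hnm e he r her hr
        · have hreq : r = k := by omega
          rw [hreq]
          obtain ⟨ri, hri, hrieq⟩ := List.getElem_of_mem he
          rw [seg_to_succ cs e k (hbnd e he).1 hk, runc_append, ← hrieq, hbal ri hri, hcadd]
          intro hcon
          omega
      · exact fun p hp => ⟨(hmt p hp).1, (hmt p hp).2.1, by have := (hmt p hp).2.2.1; omega, (hmt p hp).2.2.2⟩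
      · intro i hik hic hio
        by_cases hi : i < k
        · exact hcomp i hi hic hio
        · have : i = k := by omega
          subst this
          rw [hio] at hc1
          exact absurd rfl hc1

lemma phase1_inv (cs : List Char) :
    stInv cs cs.length (phase1 cs).1 (phase1 cs).2 := by
  suffices h : ∀ k, k ≤ cs.length →
      stInv cs k ((List.range k).foldl (fun s k' => p1step s (k', cs.getD k' ' ')) ([], [])).1
        ((List.range k).foldl (fun s k' => p1step s (k', cs.getD k' ' ')) ([], [])).2 by
    exact h cs.length le_rfl
  intro k
  induction k with
  | zero => intro _; simpa using stInv_zero cs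
  | succ k ih =>
    intro hk
    rw [List.range_succ, List.foldl_append]
    have hinv := ih (by omega)
    have := stInv_step cs k _ _ (by omega) hinv
    simpa using this

lemma lookup_of_mem_nodup {mt : List (Nat × Nat)} {i j : Nat}
    (hnd : (mt.map Prod.fst).Nodup) (hm : (i, j) ∈ mt) : mt.lookup i = some j := by
  induction mt with
  | nil => simp at hm
  | cons a t ih =>
    rcases List.mem_cons.mp hm with heq | hm'
    · subst heq; simp [List.lookup]
    · rw [List.map_cons] at hnd
      have hnd' := List.nodup_cons.mp hnd
      by_cases hia : i = a.1
      · exfalso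
        exact hnd'.1 (hia ▸ List.mem_map.mpr ⟨(i, j), hm', rfl⟩)
      · simp only [List.lookup]
        have : (i == a.1) = false := by simpa using hia
        rw [this]
        exact ih hnd'.2 hm'

lemma phase1_final (cs : List Char)
    (hpre : ∀ i, i < cs.length → cs.getD i ' ' = '(' → ∃ j, j < cs.length ∧ FH cs i j) :
    ((phase1 cs).2.map Prod.fst).Nodup ∧
    (∀ p ∈ (phase1 cs).2, p.1 < cs.length ∧ cs.getD p.1 ' ' = '(' ∧ FH cs p.1 p.2) ∧
    (∀ i, i ∈ (phase1 cs).2.map Prod.fst ↔ (i < cs.length ∧ cs.getD i ' ' = '(')) := by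
  obtain ⟨hnd, hbnd, hbal, hnm, hmt, hknd, hdisj, hcomp⟩ := phase1_inv cs
  have hstnil : (phase1 cs).1 = [] := by
    rcases h : (phase1 cs).1 with _ | ⟨e, t⟩
    · rfl
    · exfalso
      have hein : e ∈ (phase1 cs).1 := by rw [h]; exact List.mem_cons_self ..
      obtain ⟨hek, helen, heo⟩ := hbnd e hein
      obtain ⟨j, hjlen, hFH⟩ := hpre e helen heo
      exact hnm e hein j hFH.1 hjlen hFH.2.2.1
  refine ⟨hknd, fun p hp => ⟨(hmt p hp).1, (hmt p hp).2.1, (hmt p hp).2.2.2⟩, ?_⟩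
  intro i
  constructor
  · intro hi
    obtain ⟨p, hp, hpeq⟩ := List.mem_map.mp hi
    exact hpeq ▸ ⟨(hmt p hp).1, (hmt p hp).2.1⟩
  · intro ⟨hilen, hio⟩
    rcases hcomp i hilen hilen hio with hin | ⟨j, hj⟩
    · rw [hstnil] at hin; simp at hin
    · exact List.mem_map.mpr ⟨(i, j), hj, rfl⟩

lemma keys_sorted (cs : List Char)
    (hpre : ∀ i, i < cs.length → cs.getD i ' ' = '(' → ∃ j, j < cs.length ∧ FH cs i j) :
    PySem.List.sorted ((phase1 cs).2.map Prod.fst) (fun x => x) false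
      = (List.range cs.length).filter (fun i => decide (cs.getD i ' ' = '(')) := by
  obtain ⟨hknd, hmt, hmem⟩ := phase1_final cs hpre
  apply PySem.List.sorted_eq_of_perm_of_pairwise_lt
  · apply (List.perm_ext_iff_of_nodup (List.Nodup.filter _ (List.nodup_range)) hknd).mpr
    intro x
    rw [List.mem_filter, List.mem_range, hmem x]
    simp
  · exact List.Pairwise.filter _ List.pairwise_lt_range

lemma fcAux_reach (cs : List Char) (i q : Nat) (hq : q < cs.length)
    (hz : runc 1 (seg cs i q) = 0)
    (hnz : ∀ r, i < r → r < q → runc 1 (seg cs i r) ≠ 0) :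
    ∀ d p, i ≤ p → p ≤ q → q - p = d → fcAux cs p (runc 1 (seg cs i p)) = some q := by
  intro d
  induction d with
  | zero =>
    intro p hip hpq hd
    have : p = q := by omega
    subst this
    rw [fcAux, if_pos hz]
  | succ d ih =>
    intro p hip hpq hd
    have hpq' : p < q := by omega
    have hne : runc 1 (seg cs i p) ≠ 0 := by
      rcases Nat.eq_or_lt_of_le hip with h | h
      · subst h; simp [seg_self, runc]
      · exact hnz p h hpq'
    have hlt : p + 1 < cs.length := by omega
    rw [fcAux, if_neg hne, dif_pos hlt]
    have hre : cadd (runc 1 (seg cs i p)) cs[p + 1] = runc 1 (seg cs i (p + 1)) := by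
      rw [seg_succ cs i p hip hlt, runc_append, List.getD_eq_getElem _ _ hlt]
    rw [hre]
    exact ih (p + 1) (by omega) (by omega) (by omega)

lemma fcAux_of_FH (cs : List Char) (i q : Nat) (h : FH cs i q) : fcAux cs i 1 = some q := by
  obtain ⟨hiq, hq, hz, hnz⟩ := h
  have := fcAux_reach cs i q hq hz
    (fun r hr1 hr2 => hnz r (List.mem_range.mpr (by omega)) hr1) (q - i) i le_rfl (by omega) rfl
  simpa [seg_self, runc] using this


lemma foldl_flag {α : Type} (P : α → Prop) [DecidablePred P] :
    ∀ (l : List α) (b : Bool), l.foldl (fun v p => if P p then true else v) b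
      = (b || l.any (fun p => decide (P p))) := by
  intro l
  induction l with
  | nil => simp
  | cons x t ih =>
    intro b
    rw [List.foldl_cons, List.any_cons, ih]
    by_cases h : P x
    · simp [h]
    · simp [h]

lemma isValidPairA_eq (s : List Char) (i j : Nat) (hi : i < s.length) (hj : j < s.length) :
    isValidPairA s i j = some (vSet.contains (s.getD i ' ', s.getD j ' ')) := by
  rw [isValidPairA, if_pos ⟨hi, hj⟩]
  congr 1
  rw [foldl_flag]
  generalize s.getD i ' ' = a
  generalize s.getD j ' ' = b
  simp [pyValidPair, vSet, pyIndex, List.any_cons]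


lemma fold_pair (f : Nat → Int) :
    ∀ (l : List Nat) (v : Int) (b : Nat),
      (l.foldl (fun (st : Option Int × Nat) k =>
        if ltInf (f k) st.1 then (some (f k), k) else st) (some v, b)).2
      = (l.foldl (fun (p : Nat × Int) k => if f k < p.2 then (k, f k) else p) (b, v)).1 := by
  intro l
  induction l with
  | nil => simp
  | cons x t ih =>
    intro v b
    simp only [List.foldl_cons, ltInf]
    by_cases h : f x < v
    · rw [if_pos (by simpa using h), if_pos h]; exact ih (f x) x
    · rw [if_neg (by simpa using h), if_neg h]; exact ih v b

lemma findBestPairA_eq (mi mj : List Int) (h1 : 4 ≤ mi.length) (h2 : 4 ≤ mj.length) :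
    findBestPairA mi mj = some (argmin6 (fun t =>
      let q := pyValidPair.getD t (0, 0)
      mi.getD q.1 0 + mj.getD q.2 0)) := by
  rw [findBestPairA, if_pos ⟨h1, h2⟩]
  congr 1
  show (((List.range 6).foldl (fun (st : Option Int × Nat) k =>
      if ltInf ((fun t => mi.getD (pyValidPair.getD t (0, 0)).1 0 + mj.getD (pyValidPair.getD t (0, 0)).2 0) k) st.1
      then (some ((fun t => mi.getD (pyValidPair.getD t (0, 0)).1 0 + mj.getD (pyValidPair.getD t (0, 0)).2 0) k), k)
      else st) (none, 0)).2) = _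
  rw [show List.range 6 = 0 :: [1, 2, 3, 4, 5] from rfl, List.foldl_cons]
  rw [show ∀ x : Int, ltInf x none = true from fun _ => rfl, if_pos rfl]
  rw [argmin6]
  rw [show (List.range 6).drop 1 = [1, 2, 3, 4, 5] from rfl]
  exact fold_pair _ [1, 2, 3, 4, 5] _ 0


lemma bstep_length (m : List (List Int)) (mt : List (Nat × Nat)) (s : List Char) (i : Nat) :
    (bstep m mt s i).length = s.length := by
  simp only [bstep]
  split
  · rfl
  · simp

lemma loop_eq (cs : List Char) (m : List (List Int)) (mt : List (Nat × Nat)) :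
    ∀ (ks : List Nat) (s : List Char),
      (∀ i ∈ ks, ∃ j, mt.lookup i = some j ∧ findComplementA cs i = some j ∧
        i < s.length ∧ j < s.length ∧ i < m.length ∧ j < m.length ∧
        4 ≤ (m.getD i []).length ∧ 4 ≤ (m.getD j []).length) →
      ks.foldl (fun (acc : Option String) i =>
        match acc with
        | none => none
        | some s' =>
          match findComplementA cs i with
          | none => none
          | some j =>
            match isValidPairA s'.toList i j with
            | none => none
            | some true => some s'
            | some false =>
              match m[i]?, m[j]? with
              | some mi, some mj =>
                (match findBestPairA mi mj with
                 | none => none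
                 | some best =>
                   let p := pyValidPair.getD best (0, 0)
                   match modifyStringA s' i (pyIndex.getD p.1 ' ') with
                   | none => none
                   | some s1 => modifyStringA s1 j (pyIndex.getD p.2 ' '))
              | _, _ => none) (some (String.ofList s))
      = some (String.ofList (ks.foldl (bstep m mt) s)) := by
  intro ks
  induction ks with
  | nil => intro s _; simp
  | cons i t ih =>
    intro s hks
    obtain ⟨j, hlk, hfc, hi, hj, him, hjm, hri, hrj⟩ := hks i (List.mem_cons_self ..)
    have hjd : (mt.lookup i).getD 0 = j := by rw [hlk]; rfl
    rw [List.foldl_cons, List.foldl_cons]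
    have hmi : m[i]? = some (m.getD i []) := by
      rw [List.getElem?_eq_getElem him, List.getD_eq_getElem _ _ him]
    have hmj : m[j]? = some (m.getD j []) := by
      rw [List.getElem?_eq_getElem hjm, List.getD_eq_getElem _ _ hjm]
    have hstep : (match (some (String.ofList s) : Option String) with
        | none => none
        | some s' =>
          match findComplementA cs i with
          | none => none
          | some j =>
            match isValidPairA s'.toList i j with
            | none => none
            | some true => some s'
            | some false =>
              match m[i]?, m[j]? with
              | some mi, some mj =>
                (match findBestPairA mi mj with
                 | none => none
                 | some best =>
                   let p := pyValidPair.getD best (0, 0)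
                   match modifyStringA s' i (pyIndex.getD p.1 ' ') with
                   | none => none
                   | some s1 => modifyStringA s1 j (pyIndex.getD p.2 ' '))
              | _, _ => none)
        = some (String.ofList (bstep m mt s i)) := by
      show (match findComplementA cs i with
        | none => none
        | some j =>
          match isValidPairA (String.ofList s).toList i j with
          | none => none
          | some true => some (String.ofList s)
          | some false =>
            match m[i]?, m[j]? with
            | some mi, some mj =>
              (match findBestPairA mi mj with
               | none => none
               | some best =>
                 let p := pyValidPair.getD best (0, 0)
                 match modifyStringA (String.ofList s) i (pyIndex.getD p.1 ' ') with
                 | none => none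
                 | some s1 => modifyStringA s1 j (pyIndex.getD p.2 ' '))
            | _, _ => none) = some (String.ofList (bstep m mt s i))
      rw [hfc]
      rw [String.toList_ofList]
      show (match isValidPairA s i j with
        | none => none
        | some true => some (String.ofList s)
        | some false =>
          match m[i]?, m[j]? with
          | some mi, some mj =>
            (match findBestPairA mi mj with
             | none => none
             | some best =>
               let p := pyValidPair.getD best (0, 0)
               match modifyStringA (String.ofList s) i (pyIndex.getD p.1 ' ') with
               | none => none
               | some s1 => modifyStringA s1 j (pyIndex.getD p.2 ' '))
          | _, _ => none) = some (String.ofList (bstep m mt s i))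
      rw [isValidPairA_eq s i j hi hj]
      by_cases hv : vSet.contains (s.getD i ' ', s.getD j ' ') = true
      · rw [hv]
        show some (String.ofList s) = _
        unfold bstep
        rw [hjd, if_pos hv]
      · rw [Bool.not_eq_true] at hv
        rw [hv]
        show (match m[i]?, m[j]? with
          | some mi, some mj =>
            (match findBestPairA mi mj with
             | none => none
             | some best =>
               let p := pyValidPair.getD best (0, 0)
               match modifyStringA (String.ofList s) i (pyIndex.getD p.1 ' ') with
               | none => none
               | some s1 => modifyStringA s1 j (pyIndex.getD p.2 ' '))
          | _, _ => none) = _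
        rw [hmi, hmj]
        show (match findBestPairA (m.getD i []) (m.getD j []) with
             | none => none
             | some best =>
               let p := pyValidPair.getD best (0, 0)
               match modifyStringA (String.ofList s) i (pyIndex.getD p.1 ' ') with
               | none => none
               | some s1 => modifyStringA s1 j (pyIndex.getD p.2 ' ')) = _
        rw [findBestPairA_eq _ _ hri hrj]
        show (let p := pyValidPair.getD (argmin6 fun t =>
                let q := pyValidPair.getD t (0, 0)
                (m.getD i []).getD q.1 0 + (m.getD j []).getD q.2 0) (0, 0)
              match modifyStringA (String.ofList s) i (pyIndex.getD p.1 ' ') with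
              | none => none
              | some s1 => modifyStringA s1 j (pyIndex.getD p.2 ' ')) = _
        simp only [modifyStringA, String.toList_ofList]
        rw [if_pos hi]
        show (match (some (String.ofList (s.set i _)) : Option String) with
              | none => none
              | some s1 => if j < s1.toList.length then
                  some (String.ofList (s1.toList.set j _)) else none) = _
        simp only [String.toList_ofList]
        rw [if_pos (by simpa using hj)]
        congr 1
        simp only [bstep, hjd, hv, Bool.false_eq_true, if_false]
    rw [hstep]
    apply ih
    intro i' hi'
    obtain ⟨j', h1, h2, h3, h4, h5, h6, h7, h8⟩ := hks i' (List.mem_cons_of_mem _ hi')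
    have hlen := bstep_length m mt s i
    exact ⟨j', h1, h2, by rw [hlen]; exact h3, by rw [hlen]; exact h4, h5, h6, h7, h8⟩


lemma FH_unique (cs : List Char) (i q1 q2 : Nat) (h1 : FH cs i q1) (h2 : FH cs i q2) : q1 = q2 := by
  by_contra hne
  rcases Nat.lt_or_ge q1 q2 with h | h
  · exact h2.2.2.2 q1 (List.mem_range.mpr h) h1.1 h1.2.2.1
  · have : q2 < q1 := by omega
    exact h1.2.2.2 q2 (List.mem_range.mpr this) h2.1 h2.2.2.1

lemma foldl_ite_filter {α : Type} (p : Nat → Prop) [DecidablePred p] (g : α → Nat → α) :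
    ∀ (l : List Nat) (a : α),
      l.foldl (fun x y => if p y then g x y else x) a
        = (l.filter (fun y => decide (p y))).foldl g a := by
  intro l
  induction l with
  | nil => intro a; rfl
  | cons x t ih =>
    intro a
    by_cases h : p x
    · rw [List.foldl_cons, if_pos h, List.filter_cons_of_pos (by simpa using h), List.foldl_cons]
      exact ih (g a x)
    · rw [List.foldl_cons, if_neg h, List.filter_cons_of_neg (by simpa using h)]
      exact ih a

lemma main_eq (consensus : String) (m : List (List Int)) (sequence : String)
    (hpre : Pre_updateSequence consensus m sequence) :
    updateSequence consensus m sequence = updateSequence_alt consensus m sequence := by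
  have hpre' : ∀ i, i < consensus.toList.length → consensus.toList.getD i ' ' = '(' →
      ∃ j, j < consensus.toList.length ∧ FH consensus.toList i j := by
    intro i hi hio
    obtain ⟨_, _, _, j, hj, hFH, _⟩ := hpre i (List.mem_range.mpr hi) hio
    exact ⟨j, List.mem_range.mp hj, hFH⟩
  obtain ⟨hknd, hmt, hmem⟩ := phase1_final consensus.toList hpre'
  have hsorted := keys_sorted consensus.toList hpre'
  -- A's loop over range, skipping non-'(' positions, is the loop over the sorted keys
  have hf : (fun (acc : Option String) i =>
      match acc with
      | none => none
      | some s =>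
        if consensus.toList.getD i ' ' = '(' then
          match findComplementA consensus.toList i with
          | none => none
          | some j =>
            match isValidPairA s.toList i j with
            | none => none
            | some true => some s
            | some false =>
              match m[i]?, m[j]? with
              | some mi, some mj =>
                (match findBestPairA mi mj with
                 | none => none
                 | some best =>
                   let p := pyValidPair.getD best (0, 0)
                   match modifyStringA s i (pyIndex.getD p.1 ' ') with
                   | none => none
                   | some s1 => modifyStringA s1 j (pyIndex.getD p.2 ' '))
              | _, _ => none
        else some s)
      = (fun (acc : Option String) i =>
        if consensus.toList.getD i ' ' = '(' then
          (match acc with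
          | none => none
          | some s =>
            match findComplementA consensus.toList i with
            | none => none
            | some j =>
              match isValidPairA s.toList i j with
              | none => none
              | some true => some s
              | some false =>
                match m[i]?, m[j]? with
                | some mi, some mj =>
                  (match findBestPairA mi mj with
                   | none => none
                   | some best =>
                     let p := pyValidPair.getD best (0, 0)
                     match modifyStringA s i (pyIndex.getD p.1 ' ') with
                     | none => none
                     | some s1 => modifyStringA s1 j (pyIndex.getD p.2 ' '))
                | _, _ => none)
        else acc) := by
    funext acc i
    by_cases h : consensus.toList.getD i ' ' = '('
    · cases acc <;> simp only [if_pos h]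
    · cases acc <;> simp only [if_neg h]
  rw [updateSequence]
  rw [hf]
  rw [foldl_ite_filter]
  rw [← hsorted]
  have hcond : ∀ i ∈ PySem.List.sorted ((phase1 consensus.toList).2.map Prod.fst) (fun x => x) false,
      ∃ j, ((phase1 consensus.toList).2).lookup i = some j ∧
        findComplementA consensus.toList i = some j ∧
        i < sequence.toList.length ∧ j < sequence.toList.length ∧
        i < m.length ∧ j < m.length ∧
        4 ≤ (m.getD i []).length ∧ 4 ≤ (m.getD j []).length := by
    intro i hi
    have hik : i ∈ (phase1 consensus.toList).2.map Prod.fst := (PySem.List.mem_sorted _ _ _ _).mp hi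
    obtain ⟨p, hp, hpeq⟩ := List.mem_map.mp hik
    obtain ⟨hplen, hpo, hpFH⟩ := hmt p hp
    obtain ⟨hsl, him, hri, j0, hj0, hFH0, hjsl, hjm, hrj⟩ :=
      hpre i (List.mem_range.mpr (hpeq ▸ hplen)) (hpeq ▸ hpo)
    have hjeq : p.2 = j0 := FH_unique consensus.toList i p.2 j0 (hpeq ▸ hpFH) hFH0
    refine ⟨p.2, ?_, ?_, hsl, hjeq ▸ hjsl, him, hjeq ▸ hjm, hri, hjeq ▸ hrj⟩
    · exact lookup_of_mem_nodup hknd (by rw [← hpeq]; exact hp)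
    · exact fcAux_of_FH consensus.toList i p.2 (hpeq ▸ hpFH)
  have := loop_eq consensus.toList m ((phase1 consensus.toList).2) _ sequence.toList hcond
  rw [String.ofList_toList] at this
  rw [this]
  rfl

-- ===== VERDICT (by name: the statement is the Claim_ definition above) =====
theorem updateSequence_spec : Claim_equal_updateSequence := by
  intro consensus m sequence hdom hpre
  exact main_eq consensus m sequence hpre
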